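-- pv_equiv track=rewrite | github.com/nrfconnect/sdk-nrf | scripts/west_commands/pygit2_helpers.py | _commit_area_prefix
-- ===== SOURCE A (Python) =====
-- from typing import Optional
--
-- def title_is_revert(title: str) -> bool:
--     '''Return True if and only if the title starts with 'Revert '.
--
--     :param title: Git commit message title.'''
--     return title.startswith('Revert ')
--
-- def title_reverts_what(title: str) -> str:
--     '''If the title is a revert, returns title of what it reverted.
--
--     :param title: Git commit message title
--
--     For example, if title is:
--
--     'Revert "whoops: this turned out to be a bad idea"'
--
--     The return value is 'whoops: this turned out to be a bad idea';
--     i.e. the double quotes are also stripped.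
--     '''
--     revert = 'Revert '
--     return title[len(revert) + 1:-1]
--
-- def _commit_area_prefix(commit_title: str) -> Optional[str]:
--     '''Get the prefix of a pull request title which describes its area.
--
--     This returns the "raw" prefix as it appears in the title. To
--     canonicalize this to one of a known set of areas for a zephyr PR, use
--     zephyr_pr_area() instead. If no prefix is present, returns None.
--     '''
--     # Base case for recursion.
--     if not commit_title:
--         return None
--
--     # 'Revert "foo"' should map to foo's area prefix.
--     if title_is_revert(commit_title):
--         commit_title = title_reverts_what(commit_title)
--         return _commit_area_prefix(commit_title)
--
--     # If there is no ':', there is no area. Otherwise, the candidate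
--     # area is the substring up to the first ':'.
--     if ':' not in commit_title:
--         return None
--     area, rest = [s.strip() for s in commit_title.split(':', 1)]
--
--     # subsys: foo should map to foo's area prefix, etc.
--     if area in ['subsys', 'include', 'api']:
--         return _commit_area_prefix(rest)
--
--     return area
-- ===== SOURCE B (Python) =====
-- def _commit_area_prefix(commit_title):
--     '''Iterative re-implementation: a while loop with str.partition
--     instead of recursion with a membership test plus a maxsplit-1 split.'''
--     while commit_title:
--         if commit_title.startswith('Revert '):
--             commit_title = commit_title[8:-1]
--             continue
--         area, sep, rest = commit_title.partition(':')
--         if not sep: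
--             return None
--         area = area.strip()
--         if area in ('subsys', 'include', 'api'):
--             commit_title = rest.strip()
--         else:
--             return area
--     return None
-- ===== Notes on version B (the rewrite author's own statement) =====
-- stated objective: simpler
-- what changed: Recursion replaced by a while loop, and the separator membership test plus maxsplit-1 split replaced by a single str.partition call (with a tuple membership test for the skipped areas).
import Mathlib
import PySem

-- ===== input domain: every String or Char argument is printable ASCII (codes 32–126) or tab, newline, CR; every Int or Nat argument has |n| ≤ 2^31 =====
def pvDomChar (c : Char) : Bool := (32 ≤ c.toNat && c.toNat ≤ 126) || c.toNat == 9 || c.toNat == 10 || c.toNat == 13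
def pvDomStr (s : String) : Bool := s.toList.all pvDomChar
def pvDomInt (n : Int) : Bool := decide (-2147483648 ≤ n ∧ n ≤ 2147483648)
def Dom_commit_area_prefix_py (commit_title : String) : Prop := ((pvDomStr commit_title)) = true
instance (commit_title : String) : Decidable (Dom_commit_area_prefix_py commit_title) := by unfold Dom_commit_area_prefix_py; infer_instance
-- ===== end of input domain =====

-- B replaces A's recursion (with `in` + split(':', 1)) by a while loop with str.partition; objective: simpler/iterative decomposition.

-- ===== PORT A =====
-- helper: title_is_revert
def titleIsRevertC (title : List Char) : Bool := PySem.Chars.startswith title "Revert ".toList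
-- helper: title_reverts_what  (title[len('Revert ') + 1 : -1])
def titleRevertsWhatC (title : List Char) : List Char := PySem.Chars.slice title (some 8) (some (-1))

-- A's recursion, with a fuel totality guard: every recursive call is on a strictly
-- shorter title, so fuel = length + 1 is never exhausted.
def commit_area_prefix_go : Nat → List Char → Option (List Char)
  | 0, _ => none
  | fuel + 1, cs =>
    if cs.isEmpty then none
    else if titleIsRevertC cs then commit_area_prefix_go fuel (titleRevertsWhatC cs)
    else if PySem.Chars.isIn [':'] cs = false then none
    else
      -- [s.strip() for s in commit_title.split(':', 1)]; sep [':'] ≠ "" so splitMax? = some (splitOnMax …)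
      match (PySem.Chars.splitOnMax cs [':'] 1).map PySem.Chars.strip with
      | [area, rest] =>
        if ["subsys".toList, "include".toList, "api".toList].contains area then
          commit_area_prefix_go fuel rest
        else some area
      | _ => none

def commit_area_prefix_py (commit_title : String) : Option String :=
  (commit_area_prefix_go (commit_title.toList.length + 1) commit_title.toList).map String.ofList

-- ===== PORT B =====
-- B's while loop as a tail-recursive loop over the current title; same fuel guard
-- (each pass shortens the title strictly).
def commit_area_prefix_alt_loop : Nat → List Char → Option (List Char)
  | 0, _ => none
  | fuel + 1, cs =>
    if cs = [] then none
    else if "Revert ".toList.isPrefixOf cs then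
      -- commit_title[8:-1]; exact: see pv_slice_eq_drop_dropLast below
      commit_area_prefix_alt_loop fuel ((cs.drop 8).dropLast)
    else
      -- area, sep, rest = commit_title.partition(':'); sep empty iff ':' not found
      let i := PySem.Chars.find cs [':']
      if i = -1 then none
      else
        let area := PySem.Chars.strip (cs.take i.toNat)
        if area = "subsys".toList ∨ area = "include".toList ∨ area = "api".toList then
          commit_area_prefix_alt_loop fuel (PySem.Chars.strip (cs.drop (i.toNat + 1)))
        else some area

def commit_area_prefix_py_alt (commit_title : String) : Option String :=
  (commit_area_prefix_alt_loop (commit_title.toList.length + 1) commit_title.toList).map String.ofList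

-- ===== PRECONDITION & SPEC =====
def Spec_commit_area_prefix_py (commit_title : String) (out : Option String) : Prop := out = commit_area_prefix_py_alt commit_title
instance (commit_title : String) (out : Option String) : Decidable (Spec_commit_area_prefix_py commit_title out) := by unfold Spec_commit_area_prefix_py; infer_instance

-- ===== CLAIM (what is proved, stated in full; the proofs are below) =====
def Claim_equal_commit_area_prefix_py : Prop := ∀ (commit_title : String), Dom_commit_area_prefix_py commit_title → Spec_commit_area_prefix_py commit_title (commit_area_prefix_py commit_title)

-- ===== LEMMAS AND PROOFS =====

-- title[8:-1] is drop 8 then dropLast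
lemma pv_slice_eq_drop_dropLast (cs : List Char) :
    PySem.Chars.slice cs (some 8) (some (-1)) = (cs.drop 8).dropLast := by
  simp only [PySem.Chars.slice_eq_listSlice, PySem.List.slice, PySem.List.clampIdx,
    List.dropLast_eq_take, List.length_drop]
  norm_num
  split_ifs with h1
  · simp [h1]
  · rcases Nat.lt_or_ge cs.length 8 with h | h
    · have h8 : List.drop 8 cs = [] := by simp; omega
      have hmin : min (Int.toNat 8) cs.length = cs.length := by simp; omega
      simp [h8]
      omega
    · have hmin : min (Int.toNat 8) cs.length = 8 := by simp; omega
      rw [hmin]; congr 1; omega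

-- find for the single-char separator ':' points at the first colon
lemma pv_find_go_colon (l : List Char) : ∀ (k : Nat),
    PySem.Chars.find.go [':'] l k =
      if ':' ∈ l then ((k + (l.takeWhile (· ≠ ':')).length : Nat) : Int) else -1 := by
  induction l with
  | nil => intro k; simp [PySem.Chars.find.go]
  | cons c t ih =>
    intro k
    by_cases hc : c = ':'
    · subst hc
      simp [PySem.Chars.find.go, List.isPrefixOf, List.takeWhile]
    · have hp : List.isPrefixOf [':'] (c :: t) = false := by
        simp [List.isPrefixOf]; exact fun h => absurd h.symm hc
      have htw : (c :: t).takeWhile (· ≠ ':') = c :: t.takeWhile (· ≠ ':') := by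
        simp [hc]
      have hmem : (':' ∈ (c :: t)) ↔ (':' ∈ t) := by
        simp [List.mem_cons]; exact fun h => absurd h.symm hc
      rw [PySem.Chars.find.go]
      simp only [hp, Bool.false_eq_true, if_false, ih (k+1), htw, List.length_cons]
      by_cases hm : ':' ∈ t
      · rw [if_pos hm, if_pos (hmem.mpr hm)]
        push_cast; ring
      · rw [if_neg hm, if_neg (fun h => hm (hmem.mp h))]

lemma pv_find_colon (l : List Char) :
    PySem.Chars.find l [':'] =
      if ':' ∈ l then (((l.takeWhile (· ≠ ':')).length : Nat) : Int) else -1 := by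
  rw [show PySem.Chars.find l [':'] = PySem.Chars.find.go [':'] l 0 from rfl, pv_find_go_colon]
  simp

-- splitOnMax.go with maxsplit exhausted returns the remainder as one piece
lemma pv_split_go_zero : ∀ (f : Nat) (t : List Char) (acc : List (List Char)),
    PySem.Chars.splitOnMax.go [':'] f 0 t [] acc = acc.reverse ++ [t] := by
  intro f t acc
  cases f with
  | zero => simp [PySem.Chars.splitOnMax.go]
  | succ f => cases t with
    | nil => simp [PySem.Chars.splitOnMax.go]
    | cons c r => simp [PySem.Chars.splitOnMax.go]

lemma pv_split_go_colon (l : List Char) : ∀ (fuel : Nat), l.length < fuel →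
    ∀ (cur : List Char) (acc : List (List Char)),
    PySem.Chars.splitOnMax.go [':'] fuel 1 l cur acc =
      if ':' ∈ l then
        acc.reverse ++ [cur.reverse ++ l.takeWhile (· ≠ ':'), (l.dropWhile (· ≠ ':')).tail]
      else acc.reverse ++ [cur.reverse ++ l] := by
  induction l with
  | nil =>
    intro fuel h cur acc
    cases fuel with
    | zero => omega
    | succ f => simp [PySem.Chars.splitOnMax.go]
  | cons c t ih =>
    intro fuel h cur acc
    cases fuel with
    | zero => omega
    | succ f =>
      by_cases hc : c = ':'
      · subst hc
        rw [PySem.Chars.splitOnMax.go]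
        have hp : List.isPrefixOf [':'] (':' :: t) = true := by simp [List.isPrefixOf]
        simp only [hp, if_true, List.length_cons, List.drop_succ_cons]
        rw [pv_split_go_zero]
        simp [List.takeWhile, List.dropWhile]
      · have hp : List.isPrefixOf [':'] (c :: t) = false := by
          simp [List.isPrefixOf]; exact fun h => absurd h.symm hc
        have htw : (c :: t).takeWhile (· ≠ ':') = c :: t.takeWhile (· ≠ ':') := by simp [hc]
        have hdw : (c :: t).dropWhile (· ≠ ':') = t.dropWhile (· ≠ ':') := by
          simp [hc]
        have hmem : (':' ∈ (c :: t)) ↔ (':' ∈ t) := by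
          simp [List.mem_cons]; exact fun h => absurd h.symm hc
        rw [PySem.Chars.splitOnMax.go]
        simp only [hp, Bool.false_eq_true, if_false]
        have hlen : t.length < f := by simp at h; omega
        rw [if_neg (by omega : ¬ (1 : Nat) = 0)]
        rw [ih f hlen (c :: cur) acc]
        by_cases hm : ':' ∈ t
        · rw [if_pos hm, if_pos (hmem.mpr hm), htw, hdw]
          simp
        · rw [if_neg hm, if_neg (fun hx => hm (hmem.mp hx))]
          simp

lemma pv_splitOnMax_colon (cs : List Char) :
    PySem.Chars.splitOnMax cs [':'] 1 =
      if ':' ∈ cs then [cs.takeWhile (· ≠ ':'), (cs.dropWhile (· ≠ ':')).tail]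
      else [cs] := by
  rw [PySem.Chars.splitOnMax]
  rw [if_neg (by omega : ¬ (1 : Int) < 0), (by norm_num : Int.toNat 1 = 1)]
  rw [pv_split_go_colon cs (cs.length + 1) (by omega)]
  split_ifs <;> simp

lemma pv_take_takeWhile (l : List Char) :
    l.take (l.takeWhile (· ≠ ':')).length = l.takeWhile (· ≠ ':') := by
  obtain ⟨t, ht⟩ := List.takeWhile_prefix (l := l) (· ≠ ':')
  calc l.take (l.takeWhile (· ≠ ':')).length
      = (l.takeWhile (· ≠ ':') ++ t).take (l.takeWhile (· ≠ ':')).length := by rw [ht]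
    _ = l.takeWhile (· ≠ ':') := List.take_left

lemma pv_drop_takeWhile (l : List Char) :
    l.drop ((l.takeWhile (· ≠ ':')).length + 1) = (l.dropWhile (· ≠ ':')).tail := by
  have hl : l.takeWhile (· ≠ ':') ++ l.dropWhile (· ≠ ':') = l := List.takeWhile_append_dropWhile
  calc l.drop ((l.takeWhile (· ≠ ':')).length + 1)
      = (l.drop (l.takeWhile (· ≠ ':')).length).drop 1 := by rw [List.drop_drop]
    _ = ((l.takeWhile (· ≠ ':') ++ l.dropWhile (· ≠ ':')).drop (l.takeWhile (· ≠ ':')).length).drop 1 := by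
        rw [hl]
    _ = (l.dropWhile (· ≠ ':')).drop 1 := by rw [List.drop_left]
    _ = (l.dropWhile (· ≠ ':')).tail := by rw [List.drop_one]

-- the recursion and the loop take the same step and therefore agree at every fuel
lemma pv_go_eq_loop : ∀ (fuel : Nat) (cs : List Char),
    commit_area_prefix_go fuel cs = commit_area_prefix_alt_loop fuel cs := by
  intro fuel
  induction fuel with
  | zero => intro cs; rfl
  | succ f ih =>
    intro cs
    rw [commit_area_prefix_go, commit_area_prefix_alt_loop]
    by_cases hnil : cs = []
    · simp [hnil]
    · have hne : ¬ (cs.isEmpty = true) := by simp [hnil]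
      rw [if_neg hne, if_neg hnil]
      by_cases hrev : "Revert ".toList.isPrefixOf cs
      · have hA : titleIsRevertC cs = true := hrev
        rw [if_pos hA, if_pos hrev, ih, titleRevertsWhatC, pv_slice_eq_drop_dropLast]
      · have hA : ¬ (titleIsRevertC cs = true) := hrev
        rw [if_neg hA, if_neg hrev]
        by_cases hm : ':' ∈ cs
        · have hfind : PySem.Chars.find cs [':'] = ((cs.takeWhile (· ≠ ':')).length : Int) := by
            rw [pv_find_colon, if_pos hm]
          have hisIn : ¬ (PySem.Chars.isIn [':'] cs = false) := by
            simp [PySem.Chars.isIn, hfind]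
          rw [if_neg hisIn, pv_splitOnMax_colon, if_pos hm]
          simp only [List.map_cons, List.map_nil, hfind]
          rw [if_neg (by omega : ¬ ((cs.takeWhile (· ≠ ':')).length : Int) = -1)]
          have htn : ((cs.takeWhile (· ≠ ':')).length : Int).toNat
              = (cs.takeWhile (· ≠ ':')).length := by omega
          rw [htn, pv_take_takeWhile, pv_drop_takeWhile]
          have hcond : (["subsys".toList, "include".toList, "api".toList].contains
                (PySem.Chars.strip (cs.takeWhile (· ≠ ':'))) = true)
              ↔ (PySem.Chars.strip (cs.takeWhile (· ≠ ':')) = "subsys".toList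
                  ∨ PySem.Chars.strip (cs.takeWhile (· ≠ ':')) = "include".toList
                  ∨ PySem.Chars.strip (cs.takeWhile (· ≠ ':')) = "api".toList) := by
            simp [List.contains_eq_mem]
          by_cases hin : PySem.Chars.strip (cs.takeWhile (· ≠ ':')) = "subsys".toList
              ∨ PySem.Chars.strip (cs.takeWhile (· ≠ ':')) = "include".toList
              ∨ PySem.Chars.strip (cs.takeWhile (· ≠ ':')) = "api".toList
          · rw [if_pos (hcond.mpr hin), if_pos hin, ih]
          · rw [if_neg (fun h => hin (hcond.mp h)), if_neg hin]
        · have hfind : PySem.Chars.find cs [':'] = -1 := by rw [pv_find_colon, if_neg hm]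
          have hisIn : PySem.Chars.isIn [':'] cs = false := by
            simp [PySem.Chars.isIn, hfind]
          rw [if_pos hisIn, if_pos hfind]

-- ===== VERDICT (by name: the statement is the Claim_ definition above) =====
theorem commit_area_prefix_py_spec : Claim_equal_commit_area_prefix_py := by
  intro s _
  unfold Spec_commit_area_prefix_py commit_area_prefix_py commit_area_prefix_py_alt
  rw [pv_go_eq_loop]
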